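-- pv_equiv track=rewrite | github.com/Shahriar-0/Computer-Architecture-Course-Projects-S2023 | 3 - RISC-V Multi-Cycle/assets/utils/assembler/customized_assembler/assembler.py | __find_line_of_label
-- ===== SOURCE A (Python) =====
-- def __find_line_of_label(
--     lines: list[str], label: str, calling_line: int
-- ) -> int:
--     minus = 0
--     for i, line in enumerate(lines):
--         if label + ":" in line:
--             return i - minus - calling_line
--         if ":" in line:
--             minus += 1
--
--     return None
-- ===== SOURCE B (Python) =====
-- def __find_line_of_label(
--     lines: list[str], label: str, calling_line: int
-- ) -> int:
--     index = next((i for i, line in enumerate(lines) if label + ":" in line), None)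
--     if index is None:
--         return None
--     return index - sum(1 for line in lines[:index] if ":" in line) - calling_line
-- ===== Notes on version B (the rewrite author's own statement) =====
-- stated objective: alternative
-- what changed: Replaces the single interleaved scan carrying a running colon counter by two separate passes: first locate the index of the first matching line, then count ':'-containing lines in the prefix before it.
import Mathlib
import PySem

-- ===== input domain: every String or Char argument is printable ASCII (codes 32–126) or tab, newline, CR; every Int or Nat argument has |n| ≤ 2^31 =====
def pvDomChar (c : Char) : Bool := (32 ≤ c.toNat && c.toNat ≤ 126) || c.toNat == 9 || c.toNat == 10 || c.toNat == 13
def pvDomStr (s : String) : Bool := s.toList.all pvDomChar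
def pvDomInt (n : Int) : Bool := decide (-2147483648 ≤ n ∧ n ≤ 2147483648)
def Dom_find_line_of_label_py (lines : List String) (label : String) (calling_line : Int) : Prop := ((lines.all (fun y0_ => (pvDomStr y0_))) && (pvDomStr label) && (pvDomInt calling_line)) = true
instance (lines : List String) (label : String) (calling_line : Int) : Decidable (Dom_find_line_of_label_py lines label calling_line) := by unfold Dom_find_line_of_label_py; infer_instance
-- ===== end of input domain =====

-- B re-derives the same value by locating the label line first and counting ':'-prefix lines second (alternative decomposition; same cost).


-- ===== PORT A =====
-- A's single pass: enumerate with index i and running counter minus.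
def findA_go (label : String) (calling_line : Int) : List String → Int → Int → Option Int
  | [], _, _ => none
  | line :: rest, i, minus =>
    if PySem.Str.isIn (label ++ ":") line then some (i - minus - calling_line)
    else if PySem.Str.isIn ":" line then findA_go label calling_line rest (i + 1) (minus + 1)
    else findA_go label calling_line rest (i + 1) minus

def find_line_of_label_py (lines : List String) (label : String) (calling_line : Int) : Option Int :=
  findA_go label calling_line lines 0 0

-- ===== PORT B =====
-- first pass of Source B: index of the first line containing label+":" (local index), None if absent
def findB_idx (label : String) : List String → Option Nat
  | [] => none
  | line :: rest =>
    if PySem.Str.isIn (label ++ ":") line then some 0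
    else (findB_idx label rest).map (· + 1)

def find_line_of_label_py_alt (lines : List String) (label : String) (calling_line : Int) : Option Int :=
  match findB_idx label lines with
  | none => none
  | some index =>
      some ((index : Int) - ((lines.take index).countP (fun line => PySem.Str.isIn ":" line) : Int) - calling_line)

-- ===== PRECONDITION & SPEC =====
def Spec_find_line_of_label_py (lines : List String) (label : String) (calling_line : Int) (out : Option Int) : Prop := out = find_line_of_label_py_alt lines label calling_line
instance (lines : List String) (label : String) (calling_line : Int) (out : Option Int) : Decidable (Spec_find_line_of_label_py lines label calling_line out) := by unfold Spec_find_line_of_label_py; infer_instance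

-- ===== CLAIM (what is proved, stated in full; the proofs are below) =====
def Claim_equal_find_line_of_label_py : Prop := ∀ (lines : List String) (label : String) (calling_line : Int), Dom_find_line_of_label_py lines label calling_line → Spec_find_line_of_label_py lines label calling_line (find_line_of_label_py lines label calling_line)

-- ===== LEMMAS AND PROOFS =====
theorem findA_go_eq (label : String) (calling_line : Int) (ls : List String) :
    ∀ (i minus : Int), findA_go label calling_line ls i minus =
      (findB_idx label ls).map (fun (j : Nat) =>
        i + (j : Int) - (minus + ((ls.take j).countP (fun line => PySem.Str.isIn ":" line) : Int)) - calling_line) := by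
  induction ls with
  | nil => intro i minus; simp [findA_go, findB_idx]
  | cons line rest ih =>
    intro i minus
    simp only [findA_go, findB_idx]
    by_cases h : PySem.Str.isIn (label ++ ":") line = true
    · rw [if_pos h, if_pos h]
      simp only [List.take_zero, List.countP_nil, Option.map_some, Option.some.injEq, Nat.cast_zero]
      omega
    · rw [if_neg h, if_neg h]
      by_cases hc : PySem.Str.isIn ":" line = true
      · rw [if_pos hc, ih (i + 1) (minus + 1)]
        cases findB_idx label rest with
        | none => rfl
        | some j =>
          simp only [Option.map_some, Option.some.injEq, List.take_succ_cons, List.countP_cons, hc,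
            if_pos, Nat.cast_add]
          push_cast
          omega
      · rw [if_neg hc, ih (i + 1) minus]
        cases findB_idx label rest with
        | none => rfl
        | some j =>
          simp only [Option.map_some, Option.some.injEq, List.take_succ_cons, List.countP_cons, hc, Nat.cast_add]
          push_cast
          omega

-- ===== VERDICT (by name: the statement is the Claim_ definition above) =====
theorem find_line_of_label_py_spec : Claim_equal_find_line_of_label_py := by
  intro lines label calling_line _
  unfold Spec_find_line_of_label_py find_line_of_label_py find_line_of_label_py_alt
  rw [findA_go_eq]
  cases findB_idx label lines with
  | none => rfl
  | some j =>
    simp only [Option.map_some, Option.some.injEq]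
    omega
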